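-- pv_equiv track=rewrite | github.com/thomasruntaochen-ops/art_activity_collections | src/crawlers/extractors/filters.py | is_irrelevant_item_text
-- ===== SOURCE A (Python) =====
-- IRRELEVANT_ITEM_KEYWORDS = (
--     "ticket",
--     "tickets",
--     "donate",
--     "membership",
--     "member",
--     "shop",
-- )
--
-- def is_irrelevant_item_text(value: str | None) -> bool:
--     if not value:
--         return True
--     normalized = value.strip().lower()
--     if not normalized:
--         return True
--
--     # Skip top-nav and utility text that can leak into naive text parsing.
--     for keyword in IRRELEVANT_ITEM_KEYWORDS:
--         if normalized == keyword or normalized.startswith(f"{keyword} "):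
--             return True
--
--     return False
-- ===== SOURCE B (Python) =====
-- IRRELEVANT_ITEM_KEYWORDS = {
--     "ticket",
--     "tickets",
--     "donate",
--     "membership",
--     "member",
--     "shop",
-- }
--
-- def is_irrelevant_item_text(value):
--     normalized = (value or "").strip().lower()
--     if not normalized:
--         return True
--     cut = normalized.find(" ")
--     first = normalized if cut == -1 else normalized[:cut]
--     return first in IRRELEVANT_ITEM_KEYWORDS
-- ===== Notes on version B (the rewrite author's own statement) =====
-- stated objective: idiomatic
-- what changed: B folds the two falsiness guards into one normalization pass ((value or '').strip().lower()) and replaces A's per-keyword equality-or-prefix loop by locating the first space with find, slicing out the first token, and testing set membership.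
import Mathlib
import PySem

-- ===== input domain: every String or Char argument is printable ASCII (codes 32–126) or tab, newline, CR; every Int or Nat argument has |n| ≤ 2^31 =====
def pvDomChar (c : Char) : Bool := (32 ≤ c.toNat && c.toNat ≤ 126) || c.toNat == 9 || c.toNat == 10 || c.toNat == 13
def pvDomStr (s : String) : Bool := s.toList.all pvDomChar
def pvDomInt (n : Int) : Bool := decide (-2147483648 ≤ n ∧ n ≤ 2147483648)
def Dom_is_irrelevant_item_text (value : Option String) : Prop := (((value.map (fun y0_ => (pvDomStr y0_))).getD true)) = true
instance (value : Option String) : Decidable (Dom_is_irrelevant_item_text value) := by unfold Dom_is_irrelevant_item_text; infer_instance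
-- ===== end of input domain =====

-- B folds the two falsiness guards into one normalization pass and replaces A's
-- per-keyword equality/prefix loop by find-the-first-space + slice + set membership (objective: idiomatic).

-- ===== PORT A =====
def IRRELEVANT_ITEM_KEYWORDS : List String :=
  ["ticket", "tickets", "donate", "membership", "member", "shop"]

def is_irrelevant_item_text (value : Option String) : Bool :=
  match value with
  | none => true
  | some v =>
    if v == "" then true
    else
      let normalized := PySem.Str.lower (PySem.Str.strip v)
      if normalized == "" then true
      else
        -- for keyword in …: if normalized == keyword or normalized.startswith(f"{keyword} "): return True
        IRRELEVANT_ITEM_KEYWORDS.any (fun keyword =>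
          normalized == keyword || PySem.Str.startswith normalized (keyword ++ " "))

-- ===== PORT B =====
-- B's keyword set (Python set literal of distinct string literals)
def irrelevantKeywordSet : PySem.Set String :=
  PySem.Set.ofList ["ticket", "tickets", "donate", "membership", "member", "shop"]

def is_irrelevant_item_text_alt (value : Option String) : Bool :=
  -- normalized = (value or "").strip().lower()
  let normalized := PySem.Str.lower (PySem.Str.strip (value.getD ""))
  if normalized == "" then true
  else
    -- cut = normalized.find(" "); first = normalized if cut == -1 else normalized[:cut]
    let cut : Int := PySem.Str.find normalized " "
    let first := if cut == -1 then normalized else PySem.Str.slice normalized none (some cut)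
    irrelevantKeywordSet.contains first

-- ===== PRECONDITION & SPEC =====
def Spec_is_irrelevant_item_text (value : Option String) (out : Bool) : Prop := out = is_irrelevant_item_text_alt value
instance (value : Option String) (out : Bool) : Decidable (Spec_is_irrelevant_item_text value out) := by unfold Spec_is_irrelevant_item_text; infer_instance

-- ===== CLAIM (what is proved, stated in full; the proofs are below) =====
def Claim_equal_is_irrelevant_item_text : Prop := ∀ (value : Option String), Dom_is_irrelevant_item_text value → Spec_is_irrelevant_item_text value (is_irrelevant_item_text value)

-- ===== LEMMAS AND PROOFS =====

-- a singleton is an infix iff the character occurs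
lemma singleton_infix_iff (a : Char) (l : List Char) : [a] <:+: l ↔ a ∈ l := by
  constructor
  · intro h; exact h.sublist.subset (by simp)
  · intro h
    obtain ⟨s, t, rfl⟩ := List.append_of_mem h
    exact ⟨s, t, by simp⟩

-- a singleton prefix is "head is that character"
lemma singleton_prefix_iff (a : Char) (l : List Char) : [a] <+: l ↔ l.head? = some a := by
  cases l with
  | nil => simp
  | cons b t => simp [List.cons_prefix_cons, eq_comm]

-- if p holds strictly before k and fails at k, takeWhile is take k
lemma takeWhile_eq_take_of (p : Char → Bool) (l : List Char) (k : Nat)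
    (hk : k < l.length) (hlt : ∀ i, (h : i < k) → p (l[i]'(by omega)) = true)
    (hkf : p (l[k]'hk) = false) : l.takeWhile p = l.take k := by
  induction l generalizing k with
  | nil => simp at hk
  | cons c t ih =>
    cases k with
    | zero => simp at hkf; simp [hkf]
    | succ k' =>
      have hc : p c = true := hlt 0 (by omega)
      simp only [List.takeWhile_cons, hc, if_true, List.take_succ_cons]
      congr 1
      exact ih k' (by simpa using hk) (fun i h => hlt (i+1) (by omega))
        (by simp only [List.getElem_cons_succ] at hkf; exact hkf)

-- B's first token, on the character-list side, is the leading run of non-space characters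
lemma first_toList (n : String) :
    (if PySem.Str.find n " " == -1 then n
     else PySem.Str.slice n none (some (PySem.Str.find n " "))).toList
      = n.toList.takeWhile (fun c => !(c == ' ')) := by
  have hf : PySem.Str.find n " " = PySem.Chars.find n.toList [' '] := by
    simp [PySem.Str.find_eq]
  by_cases h : PySem.Chars.find n.toList [' '] = -1
  · rw [if_pos (by rw [hf]; simp [h])]
    have hmem : ¬ (' ' ∈ n.toList) := by
      rw [← singleton_infix_iff]
      exact (PySem.Chars.find_eq_neg_one_iff _ _).mp h
    rw [List.takeWhile_eq_self_iff.mpr (by intro c hc; simp; intro he; exact hmem (he ▸ hc))]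
  · rw [if_neg (by rw [hf]; simp [h])]
    have hnn : 0 ≤ PySem.Chars.find n.toList [' '] :=
      (PySem.Chars.find_nonneg_iff _ _).mpr ((PySem.Chars.find_ne_neg_one_iff _ _).mp h)
    obtain ⟨hpre, hmin⟩ := PySem.Chars.find_spec (s := n.toList) (sub := [' ']) hnn
    set k := (PySem.Chars.find n.toList [' ']).toNat with hk
    have hkl : k < n.toList.length := by
      have hhd := (singleton_prefix_iff _ _).mp hpre
      by_contra hge
      rw [List.drop_eq_nil_of_le (by omega)] at hhd
      simp at hhd
    have hslice : (PySem.Str.slice n none (some (PySem.Str.find n " "))).toList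
        = n.toList.take k := by
      rw [PySem.Str.toList_slice, PySem.Chars.slice_eq_listSlice, hf,
        PySem.List.slice_to _ hnn]
    rw [hslice]
    symm
    apply takeWhile_eq_take_of _ _ _ hkl
    · intro i hi
      have hni := hmin i (by omega)
      rw [singleton_prefix_iff, List.head?_drop] at hni
      simp only [List.getElem?_eq_getElem (by omega : i < n.toList.length)] at hni
      have hne : n.toList[i] ≠ ' ' := fun he => hni (by rw [he])
      simp [hne]
    · have := (singleton_prefix_iff _ _).mp hpre
      rw [List.head?_drop, List.getElem?_eq_getElem hkl] at this
      simp only [Option.some.injEq] at this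
      simp [this]

-- A's per-keyword test (equality or "<kw> "-prefix) is exactly "leading token = kw",
-- for any space-free non-empty keyword
lemma key_chars (k : List Char) (hne : k ≠ []) (hk : ∀ c ∈ k, ¬ c = ' ') (cs : List Char) :
    ((cs == k) || PySem.Chars.startswith cs (k ++ [' ']))
      = (cs.takeWhile (fun c => !(c == ' ')) == k) := by
  apply Bool.coe_iff_coe.mp
  simp only [Bool.or_eq_true, beq_iff_eq, PySem.Chars.startswith_iff]
  constructor
  · rintro (rfl | ⟨t, rfl⟩)
    · exact List.takeWhile_eq_self_iff.mpr (by intro c hc; simpa using hk c hc)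
    · rw [List.append_assoc, List.takeWhile_append]
      rw [if_pos (by rw [List.takeWhile_eq_self_iff.mpr (by intro c hc; simpa using hk c hc)]),
        List.singleton_append, List.takeWhile_cons]
      simp
  · intro ht
    have hsplit := List.takeWhile_append_dropWhile (p := fun c => !(c == ' ')) (l := cs)
    cases hd : cs.dropWhile (fun c => !(c == ' ')) with
    | nil =>
      left
      rw [hd, List.append_nil] at hsplit
      rw [← hsplit, ht]
    | cons d t =>
      right
      have hdne : cs.dropWhile (fun c => !(c == ' ')) ≠ [] := by simp [hd]
      have hp := List.head_dropWhile_not (fun c => !(c == ' ')) hdne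
      simp only [hd, List.head_cons, Bool.not_eq_false', beq_iff_eq] at hp
      refine ⟨t, ?_⟩
      rw [← hsplit, hd, ht, hp]
      simp

-- per-keyword bridge at the String level
lemma key_str (k : String) (hne : k.toList ≠ []) (hk : ∀ c ∈ k.toList, ¬ c = ' ') (n : String) :
    (n == k || PySem.Str.startswith n (k ++ " "))
      = ((if PySem.Str.find n " " == -1 then n
          else PySem.Str.slice n none (some (PySem.Str.find n " "))) == k) := by
  have h1 : (n == k) = (n.toList == k.toList) := by
    apply Bool.coe_iff_coe.mp; simp [String.toList_inj]
  have h2 : ((if PySem.Str.find n " " == -1 then n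
          else PySem.Str.slice n none (some (PySem.Str.find n " "))) == k)
      = (((if PySem.Str.find n " " == -1 then n
          else PySem.Str.slice n none (some (PySem.Str.find n " ")))).toList == k.toList) := by
    apply Bool.coe_iff_coe.mp; simp [String.toList_inj]
  rw [h1, h2, first_toList]
  have h3 : (k ++ " ").toList = k.toList ++ [' '] := by simp
  rw [PySem.Str.startswith_eq, h3]
  exact key_chars k.toList hne hk n.toList

-- ===== VERDICT (by name: the statement is the Claim_ definition above) =====
set_option maxRecDepth 16000 in
theorem is_irrelevant_item_text_spec : Claim_equal_is_irrelevant_item_text := by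
  intro value _hdom
  unfold Spec_is_irrelevant_item_text
  cases value with
  | none => decide
  | some v =>
    simp only [is_irrelevant_item_text, is_irrelevant_item_text_alt, Option.getD_some]
    by_cases h1 : v == ""
    · have : v = "" := by simpa using h1
      subst this; decide
    · simp only [h1, Bool.false_eq_true, if_false]
      by_cases h2 : PySem.Str.lower (PySem.Str.strip v) == ""
      · simp [h2]
      · simp only [h2, Bool.false_eq_true, if_false]
        set n := PySem.Str.lower (PySem.Str.strip v) with hn
        simp only [IRRELEVANT_ITEM_KEYWORDS, irrelevantKeywordSet, List.any_cons, List.any_nil]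
        rw [key_str "ticket" (by simp) (by simp) n,
            key_str "tickets" (by simp) (by simp) n,
            key_str "donate" (by simp) (by simp) n,
            key_str "membership" (by simp) (by simp) n,
            key_str "member" (by simp) (by simp) n,
            key_str "shop" (by simp) (by simp) n]
        rw [show PySem.Set.ofList ["ticket", "tickets", "donate", "membership", "member", "shop"]
              = (["ticket", "tickets", "donate", "membership", "member", "shop"] : List String) from rfl]
        simp only [PySem.Set.contains, List.contains_cons, List.contains_nil, Bool.or_false]
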